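-- pv_equiv track=rewrite | github.com/nikita-kostin/active-time-scheduling | utils/maximum_matching.py | _contract_graph
-- ===== SOURCE A (Python) =====
-- from typing import Any, Dict, Iterable, List, Optional, Set, Tuple
--
-- def _contract_graph(graph: List[Set[int]], id_to_contracted: Dict[int, int]) -> List[Set[int]]:
--     contracted_graph = []
--     for u in range(len(id_to_contracted)):
--         contracted_graph.append(set())
--
--     for u1 in range(len(graph)):
--         for u in graph[u1]:
--             if id_to_contracted[u1] != 0 or id_to_contracted[u] != 0:
--                 contracted_graph[id_to_contracted[u1]].add(id_to_contracted[u])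
--
--     return contracted_graph
-- ===== SOURCE B (Python) =====
-- def _contract_graph(graph, id_to_contracted):
--     n = len(id_to_contracted)
--     groups = [[] for _ in range(n)]
--     for u1 in range(len(graph)):
--         if graph[u1]:
--             groups[id_to_contracted[u1]].append(u1)
--     return [
--         {
--             id_to_contracted[u]
--             for u1 in members
--             for u in graph[u1]
--             if id_to_contracted[u1] != 0 or id_to_contracted[u] != 0
--         }
--         for members in groups
--     ]
-- ===== Notes on version B (the rewrite author's own statement) =====
-- stated objective: alternative
-- what changed: Replaces A's edge-centric loop that scatters single edges into output sets by an inverse-index pass: first group all edged vertices by their contracted id, then emit each output row at once from its group.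
import Mathlib
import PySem

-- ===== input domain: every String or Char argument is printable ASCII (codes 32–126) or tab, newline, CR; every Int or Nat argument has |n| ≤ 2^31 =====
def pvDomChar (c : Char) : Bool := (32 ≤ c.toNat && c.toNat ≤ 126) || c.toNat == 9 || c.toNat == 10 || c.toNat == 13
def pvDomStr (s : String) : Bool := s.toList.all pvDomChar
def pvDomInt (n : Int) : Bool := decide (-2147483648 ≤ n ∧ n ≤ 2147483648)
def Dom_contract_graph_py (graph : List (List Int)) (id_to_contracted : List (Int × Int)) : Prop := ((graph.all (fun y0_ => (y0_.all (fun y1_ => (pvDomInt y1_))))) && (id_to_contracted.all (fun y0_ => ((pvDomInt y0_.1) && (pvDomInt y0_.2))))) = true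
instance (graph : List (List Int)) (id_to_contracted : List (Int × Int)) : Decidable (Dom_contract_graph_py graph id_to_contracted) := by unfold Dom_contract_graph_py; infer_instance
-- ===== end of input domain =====

-- B replaces A's edge-centric scatter loop by an inverse index (group the vertices that have
-- edges by their contracted id first, then emit each output row at once); same cost class,
-- objective: alternative.

-- ===== PORT A =====
def contract_graph_py (graph : List (List Int)) (id_to_contracted : List (Int × Int)) : List (List Int) :=
  let d := PySem.Dict.ofList id_to_contracted
  -- contracted_graph = []; for u in range(len(id_to_contracted)): contracted_graph.append(set())
  let contracted_graph : List (List Int) :=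
    (List.range d.size).foldl (fun acc _ => acc ++ [([] : List Int)]) []
  -- for u1 in range(len(graph)): for u in graph[u1]: if ...: contracted_graph[...].add(...)
  (List.range graph.length).foldl (fun cg (u1 : Nat) =>
    (PySem.List.pyGetD graph (u1 : Int) []).foldl (fun cg u =>
      if d.getD (u1 : Int) 0 ≠ 0 ∨ d.getD u 0 ≠ 0 then
        PySem.List.pySetD cg (d.getD (u1 : Int) 0)
          (PySem.Set.add (PySem.List.pyGetD cg (d.getD (u1 : Int) 0) []) (d.getD u 0))
      else cg) cg) contracted_graph

-- ===== PORT B =====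
def contract_graph_py_alt (graph : List (List Int)) (id_to_contracted : List (Int × Int)) : List (List Int) :=
  let d := PySem.Dict.ofList id_to_contracted
  -- groups = [[] for _ in range(n)]
  let groups0 : List (List Int) := (List.range d.size).map (fun _ => ([] : List Int))
  -- for u1 in range(len(graph)): if graph[u1]: groups[id_to_contracted[u1]].append(u1)
  let groups :=
    (List.range graph.length).foldl (fun g (u1 : Nat) =>
      if PySem.List.pyGetD graph (u1 : Int) [] ≠ [] then
        PySem.List.pySetD g (d.getD (u1 : Int) 0)
          (PySem.List.pyGetD g (d.getD (u1 : Int) 0) [] ++ [(u1 : Int)])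
      else g) groups0
  -- [{id_to_contracted[u] for u1 in members for u in graph[u1] if ...} for members in groups]
  groups.map (fun members =>
    members.foldl (fun s u1 =>
      (PySem.List.pyGetD graph u1 []).foldl (fun s u =>
        if d.getD u1 0 ≠ 0 ∨ d.getD u 0 ≠ 0 then PySem.Set.add s (d.getD u 0) else s) s) [])

-- ===== PRECONDITION & SPEC =====
-- Pre_ excludes exactly the inputs on which A raises: a vertex with a nonempty adjacency set
-- whose id (or a neighbour's id) is missing from the mapping, or whose contracted id lies
-- outside Python's index range of the output list.  Vertices with empty adjacency sets are
-- unconstrained, matching A, which never reads the mapping for them.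
def Pre_contract_graph_py (graph : List (List Int)) (id_to_contracted : List (Int × Int)) : Prop :=
  ∀ u1 ∈ List.range graph.length, PySem.List.pyGetD graph (u1 : Int) [] ≠ [] →
    ((PySem.Dict.ofList id_to_contracted).get? (u1 : Int)).isSome = true ∧
    -(((PySem.Dict.ofList id_to_contracted).size : Int)) ≤ (PySem.Dict.ofList id_to_contracted).getD (u1 : Int) 0 ∧
    (PySem.Dict.ofList id_to_contracted).getD (u1 : Int) 0 < ((PySem.Dict.ofList id_to_contracted).size : Int) ∧
    ∀ u ∈ PySem.List.pyGetD graph (u1 : Int) [],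
      ((PySem.Dict.ofList id_to_contracted).get? u).isSome = true
instance (graph : List (List Int)) (id_to_contracted : List (Int × Int)) : Decidable (Pre_contract_graph_py graph id_to_contracted) := by unfold Pre_contract_graph_py; infer_instance

def pvWitness_contract_graph_py : List (List Int) × (List (Int × Int)) := ([[1], [0]], [(0, 1), (1, 0)])

def Spec_contract_graph_py (graph : List (List Int)) (id_to_contracted : List (Int × Int)) (out : List (List Int)) : Prop := out = contract_graph_py_alt graph id_to_contracted
instance (graph : List (List Int)) (id_to_contracted : List (Int × Int)) (out : List (List Int)) : Decidable (Spec_contract_graph_py graph id_to_contracted out) := by unfold Spec_contract_graph_py; infer_instance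

-- ===== CLAIM (what is proved, stated in full; the proofs are below) =====
def Claim_equal_contract_graph_py : Prop := ∀ (graph : List (List Int)) (id_to_contracted : List (Int × Int)), Dom_contract_graph_py graph id_to_contracted → Pre_contract_graph_py graph id_to_contracted → Spec_contract_graph_py graph id_to_contracted (contract_graph_py graph id_to_contracted)

-- ===== LEMMAS AND PROOFS =====

-- Python's normalised index for -n ≤ i < n
def pvPIdx (n : Nat) (i : Int) : Nat := if 0 ≤ i then i.toNat else n - (-i).toNat

theorem pvPIdx_lt (n : Nat) (i : Int) (h1 : -(n : Int) ≤ i) (h2 : i < n) : pvPIdx n i < n := by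
  unfold pvPIdx
  split <;> omega

theorem pvPyIdx?_eq (n : Nat) (i : Int) (h1 : -(n : Int) ≤ i) (h2 : i < n) :
    PySem.List.pyIdx? n i = some (pvPIdx n i) := by
  simp only [PySem.List.pyIdx?, pvPIdx]
  split_ifs <;> simp_all

theorem pvPySetD_eq {α : Type} (xs : List α) (i : Int) (v : α)
    (h1 : -(xs.length : Int) ≤ i) (h2 : i < xs.length) :
    PySem.List.pySetD xs i v = xs.set (pvPIdx xs.length i) v := by
  unfold PySem.List.pySetD PySem.List.pySet?
  rw [pvPyIdx?_eq _ _ h1 h2]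
  rfl

theorem pvPyGetD_eq {α : Type} (xs : List α) (i : Int) (dflt : α)
    (h1 : -(xs.length : Int) ≤ i) (h2 : i < xs.length) :
    PySem.List.pyGetD xs i dflt = xs.getD (pvPIdx xs.length i) dflt := by
  unfold PySem.List.pyGetD PySem.List.pyGet?
  rw [pvPyIdx?_eq _ _ h1 h2, List.getD_eq_getElem?_getD]
  rfl

theorem pvGetD_set {α : Type} (g : List α) (i j : Nat) (x dflt : α) (hi : i < g.length) :
    (g.set i x).getD j dflt = if j = i then x else g.getD j dflt := by
  by_cases h : j = i
  · subst h
    rw [List.getD_eq_getElem?_getD, List.getElem?_set_self hi]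
    simp
  · rw [List.getD_eq_getElem?_getD, List.getElem?_set_ne (Ne.symm h),
      ← List.getD_eq_getElem?_getD, if_neg h]

theorem pvMapGetD {α : Type} (g : List α) (dflt : α) :
    (List.range g.length).map (fun r => g.getD r dflt) = g := by
  apply List.ext_getElem
  · simp
  · intro i _ h2
    simp [List.getD_eq_getElem?_getD, List.getElem?_eq_getElem h2]

-- a fold whose step is the identity off a predicate equals the fold over the filtered list
theorem pvFoldlFilter {α : Type} (P : Nat → Bool) (f : α → Nat → α)
    (h : ∀ a u, P u = false → f a u = a) :
    ∀ (l : List Nat) (a : α), l.foldl f a = (l.filter P).foldl f a := by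
  intro l
  induction l with
  | nil => intro a; rfl
  | cons u t ih =>
    intro a
    by_cases hP : P u = true
    · simp [hP, ih]
    · have hP' : P u = false := by simpa using hP
      simp [hP', h a u hP', ih]

-- a loop that at each step rewrites only the row p u of the state splits into per-row loops
theorem pvScatter (p : Nat → Nat) (upd : Nat → List Int → List Int)
    (step : List (List Int) → Nat → List (List Int)) :
    ∀ (l : List Nat) (g : List (List Int)),
      (∀ g' u, g'.length = g.length → u ∈ l → step g' u = g'.set (p u) (upd u (g'.getD (p u) []))) →
      (∀ u ∈ l, p u < g.length) →
      l.foldl step g = (List.range g.length).map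
        (fun r => ((l.filter (fun u => p u = r)).foldl (fun a u => upd u a) (g.getD r []))) := by
  intro l
  induction l with
  | nil => intro g _ _; simpa using (pvMapGetD g []).symm
  | cons u t ih =>
    intro g hstep hp
    have hpu : p u < g.length := hp u (by simp)
    have hg' : (g.set (p u) (upd u (g.getD (p u) []))).length = g.length := by simp
    have hstep' : ∀ g' v, g'.length = (g.set (p u) (upd u (g.getD (p u) []))).length → v ∈ t →
        step g' v = g'.set (p v) (upd v (g'.getD (p v) [])) := by
      intro g' v hlen hv; exact hstep g' v (by omega) (by simp [hv])
    have hp' : ∀ v ∈ t, p v < (g.set (p u) (upd u (g.getD (p u) []))).length := by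
      intro v hv; simpa using hp v (by simp [hv])
    calc (u :: t).foldl step g
        = t.foldl step (g.set (p u) (upd u (g.getD (p u) []))) := by
          simp only [List.foldl_cons]; rw [hstep g u rfl (by simp)]
      _ = (List.range g.length).map (fun r => ((t.filter (fun v => p v = r)).foldl
            (fun a v => upd v a) ((g.set (p u) (upd u (g.getD (p u) []))).getD r []))) := by
          rw [ih _ hstep' hp', hg']
      _ = (List.range g.length).map (fun r => (((u :: t).filter (fun v => p v = r)).foldl
            (fun a v => upd v a) (g.getD r []))) := by
          apply List.map_congr_left
          intro r _
          by_cases h : p u = r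
          · subst h
            rw [pvGetD_set _ _ _ _ _ hpu]
            simp
          · rw [pvGetD_set _ _ _ _ _ hpu]
            simp [h, Ne.symm h]

-- A's inner edge loop updates a single row: it is one List.set of a row-local fold
theorem pvInner (C : Int → Prop) [DecidablePred C] (w : Int → Int) (v : Int) :
    ∀ (edges : List Int) (cg : List (List Int)),
      -(cg.length : Int) ≤ v → v < cg.length →
      edges.foldl (fun cg u =>
          if C u then PySem.List.pySetD cg v (PySem.Set.add (PySem.List.pyGetD cg v []) (w u))
          else cg) cg
      = cg.set (pvPIdx cg.length v)
          (edges.foldl (fun row u => if C u then PySem.Set.add row (w u) else row)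
            (cg.getD (pvPIdx cg.length v) [])) := by
  intro edges
  induction edges with
  | nil =>
    intro cg h1 h2
    have hlt := pvPIdx_lt cg.length v h1 h2
    simp [List.getD_eq_getElem?_getD, List.getElem?_eq_getElem hlt, List.set_getElem_self]
  | cons u t ih =>
    intro cg h1 h2
    have hlt := pvPIdx_lt cg.length v h1 h2
    by_cases hC : C u
    · simp only [List.foldl_cons, if_pos hC]
      rw [pvPyGetD_eq _ _ _ h1 h2, pvPySetD_eq _ _ _ h1 h2]
      have hlen : (cg.set (pvPIdx cg.length v) (PySem.Set.add (cg.getD (pvPIdx cg.length v) []) (w u))).length = cg.length := by simp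
      rw [ih _ (by rw [hlen]; exact h1) (by rw [hlen]; exact h2)]
      rw [hlen, List.set_set, pvGetD_set _ _ _ _ _ hlt]
      simp
    · simp only [List.foldl_cons, if_neg hC]
      rw [ih _ h1 h2]

theorem pvG0GetD (n r : Nat) : ((List.range n).map (fun _ => ([] : List Int))).getD r [] = [] := by
  rw [List.getD_eq_getElem?_getD, List.getElem?_map]
  cases (List.range n)[r]? <;> simp

-- ===== VERDICT (by name: the statement is the Claim_ definition above) =====
theorem contract_graph_py_spec : Claim_equal_contract_graph_py := by
  intro graph idmap _ hpre
  unfold Spec_contract_graph_py contract_graph_py contract_graph_py_alt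
  simp only []
  set d := PySem.Dict.ofList idmap with hd
  set n := d.size with hn
  -- the list of edged vertices
  set E : Nat → Bool := fun u1 => decide (PySem.List.pyGetD graph (u1 : Int) [] ≠ []) with hE
  set l : List Nat := (List.range graph.length).filter E with hl
  have hlmem : ∀ u ∈ l, u ∈ List.range graph.length ∧ PySem.List.pyGetD graph (u : Int) [] ≠ [] := by
    intro u hu
    rw [hl, List.mem_filter] at hu
    exact ⟨hu.1, by simpa [hE] using hu.2⟩
  have hb : ∀ u1 ∈ l, -(n : Int) ≤ d.getD (u1 : Int) 0 ∧ d.getD (u1 : Int) 0 < (n : Int) := by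
    intro u1 h
    obtain ⟨h1, h2⟩ := hlmem u1 h
    exact ⟨(hpre u1 h1 h2).2.1, (hpre u1 h1 h2).2.2.1⟩
  set p : Nat → Nat := fun u1 => pvPIdx n (d.getD (u1 : Int) 0) with hp
  set updA : Nat → List Int → List Int := fun u1 row =>
    (PySem.List.pyGetD graph (u1 : Int) []).foldl
      (fun row u => if d.getD (u1 : Int) 0 ≠ 0 ∨ d.getD u 0 ≠ 0
        then PySem.Set.add row (d.getD u 0) else row) row with hupdA
  set g0 : List (List Int) := (List.range n).map (fun _ => ([] : List Int)) with hg0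
  have hg0len : g0.length = n := by simp [hg0]
  have hplt : ∀ u ∈ l, p u < g0.length := by
    intro u hu
    rw [hg0len]
    exact pvPIdx_lt n _ (hb u hu).1 (hb u hu).2
  -- the initial list of A is g0
  have hinit : (List.range n).foldl (fun acc _ => acc ++ [([] : List Int)]) [] = g0 := by
    rw [PySem.List.foldl_append_singleton_eq_map]
    simp [hg0]
  rw [hinit]
  -- A's outer fold is the identity on unedged vertices: restrict it to l
  rw [pvFoldlFilter E _ (by
    intro a u hu
    have : PySem.List.pyGetD graph (u : Int) [] = [] := by simpa [hE] using hu
    simp [this]) (List.range graph.length) g0]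
  -- B's grouping fold likewise restricts to l (its guard is exactly E)
  rw [pvFoldlFilter E _ (by
    intro a u hu
    have : PySem.List.pyGetD graph (u : Int) [] = [] := by simpa [hE] using hu
    simp [this]) (List.range graph.length) g0]
  rw [← hl]
  -- A's outer loop over l is a scatter with update updA
  have hstepA : ∀ g' u, g'.length = g0.length → u ∈ l →
      (PySem.List.pyGetD graph (u : Int) []).foldl (fun cg x =>
        if d.getD (u : Int) 0 ≠ 0 ∨ d.getD x 0 ≠ 0 then
          PySem.List.pySetD cg (d.getD (u : Int) 0)
            (PySem.Set.add (PySem.List.pyGetD cg (d.getD (u : Int) 0) []) (d.getD x 0))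
        else cg) g'
      = g'.set (p u) (updA u (g'.getD (p u) [])) := by
    intro g' u hlen hu
    have hlen' : g'.length = n := by rw [hlen, hg0len]
    have h1 : -((g'.length : Int)) ≤ d.getD (u : Int) 0 := by rw [hlen']; exact (hb u hu).1
    have h2 : d.getD (u : Int) 0 < (g'.length : Int) := by rw [hlen']; exact (hb u hu).2
    have := pvInner (fun x => d.getD (u : Int) 0 ≠ 0 ∨ d.getD x 0 ≠ 0)
      (fun x => d.getD x 0) (d.getD (u : Int) 0) (PySem.List.pyGetD graph (u : Int) []) g' h1 h2
    rw [this, hlen']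
  rw [pvScatter p updA _ l g0 hstepA hplt]
  -- B's grouping loop over l is a scatter with update (· ++ [↑u1])
  have hstepG : ∀ g' u, g'.length = g0.length → u ∈ l →
      (if PySem.List.pyGetD graph (u : Int) [] ≠ [] then
        PySem.List.pySetD g' (d.getD (u : Int) 0)
          (PySem.List.pyGetD g' (d.getD (u : Int) 0) [] ++ [(u : Int)])
      else g')
      = g'.set (p u) (g'.getD (p u) [] ++ [(u : Int)]) := by
    intro g' u hlen hu
    have hlen' : g'.length = n := by rw [hlen, hg0len]
    have h1 : -((g'.length : Int)) ≤ d.getD (u : Int) 0 := by rw [hlen']; exact (hb u hu).1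
    have h2 : d.getD (u : Int) 0 < (g'.length : Int) := by rw [hlen']; exact (hb u hu).2
    rw [if_pos (hlmem u hu).2, pvPySetD_eq _ _ _ h1 h2, pvPyGetD_eq _ _ _ h1 h2, hlen']
  rw [pvScatter p (fun u row => row ++ [(u : Int)]) _ l g0 hstepG hplt]
  rw [List.map_map]
  apply List.map_congr_left
  intro r hr
  simp only [Function.comp_apply, pvG0GetD, hg0]
  rw [PySem.List.foldl_append_singleton_eq_map, List.nil_append, List.foldl_map]
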